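-- pv_equiv track=rewrite | github.com/YosysHQ/icestorm | icebox/icebox_asc2hlc.py | discard_unused_arguments
-- ===== SOURCE A (Python) =====
-- def discard_argument(lut, args, i, keep):
--     assert len(lut) == 1 << len(args)
--     assert i >= 0 and i < len(args)
--     return ''.join(bit for j, bit in enumerate(lut)
--                    if (j & (1 << i) != 0) == keep), \
--            args[:i] + args[i + 1:]
--
-- def discard_unused_arguments(lut, args):
--     assert len(lut) == 1 << len(args)
--     i = 0
--     while i < len(args):
--         diff = False
--         for j in range(len(lut)):
--             if j & (1 << i) == 0 and lut[j] != lut[j | (1 << i)]: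
--                 diff = True
--         if not diff:
--             lut, args = discard_argument(lut, args, i, False)
--         else:
--             i += 1
--     return lut, args
-- ===== SOURCE B (Python) =====
-- def discard_unused_arguments(lut, args):
--     # Single left-to-right pass: repeatedly halve the truth table by merging
--     # adjacent cells, discarding the current argument when the two halves agree.
--     assert len(lut) == 1 << len(args)
--     cells = list(lut)
--     used = []
--     for a in args:
--         evens = cells[0::2]
--         odds = cells[1::2]
--         if evens == odds:
--             cells = evens
--         else:
--             cells = [x + y for x, y in zip(evens, odds)]
--             used.append(a)
--     return ''.join(cells), used
-- ===== Notes on version B (the rewrite author's own statement) =====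
-- stated objective: alternative
-- what changed: B replaces A's restart-and-rescan while-loop (which re-filters the whole LUT string and re-slices args after each discard) by a single left-to-right pass that halves the truth table into even/odd cell lists, discarding an argument exactly when the two halves agree and merging cells otherwise.
import Mathlib
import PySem

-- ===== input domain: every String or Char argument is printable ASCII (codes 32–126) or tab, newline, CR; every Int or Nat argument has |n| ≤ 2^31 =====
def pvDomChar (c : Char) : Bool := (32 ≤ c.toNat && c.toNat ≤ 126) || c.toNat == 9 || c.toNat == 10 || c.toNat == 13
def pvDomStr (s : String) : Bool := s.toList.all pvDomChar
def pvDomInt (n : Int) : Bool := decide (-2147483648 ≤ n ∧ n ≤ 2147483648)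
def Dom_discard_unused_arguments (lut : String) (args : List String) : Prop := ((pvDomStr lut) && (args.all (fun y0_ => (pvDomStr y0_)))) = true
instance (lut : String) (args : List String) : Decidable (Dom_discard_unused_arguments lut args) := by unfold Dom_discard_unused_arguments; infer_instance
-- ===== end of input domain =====

-- B discards all unused LUT inputs in one left-to-right pass over the arguments, merging the
-- truth table into ever-larger cells, instead of A's restart-and-rescan loop; objective: alternative.

-- ===== PORT A =====
-- ''.join(bit for j, bit in enumerate(lut) if (j & (1 << i) != 0) == keep)   (the lut half of discard_argument)
def pvDiscardA (lut : List Char) (i : Nat) (keep : Bool) : List Char :=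
  ((PySem.List.enumerate lut).filter
      (fun jb => (decide (PySem.Int.band jb.1 ((1:Int) <<< i) ≠ 0)) == keep)).map Prod.snd

-- diff = False; for j in range(len(lut)): if j & (1 << i) == 0 and lut[j] != lut[j | (1 << i)]: diff = True
-- (indices produced by range are in range, so lut[j] is read with pyGetD)
def pvDiffA (lut : List Char) (i : Nat) : Bool :=
  (PySem.List.pyRange 0 (PySem.List.len lut) 1).foldl
    (fun d j =>
      if PySem.Int.band j ((1:Int) <<< i) = 0 ∧
         PySem.List.pyGetD lut j ' ' ≠ PySem.List.pyGetD lut (PySem.Int.bor j ((1:Int) <<< i)) ' '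
      then true else d) false

-- the while loop of discard_unused_arguments, state (lut, args, i)
def pvLoopA (lut : List Char) (args : List String) (i : Nat) : List Char × List String :=
  if h : i < args.length then
    if pvDiffA lut i = false then
      pvLoopA (pvDiscardA lut i false)
        (PySem.List.slice args none (some (i:Int)) ++ PySem.List.slice args (some ((i:Int)+1)) none) i
    else
      pvLoopA lut args (i+1)
  else (lut, args)
termination_by args.length - i
decreasing_by
  · have h1 : (PySem.List.slice args none (some (i:Int))) = args.take i :=
      PySem.List.slice_to_natCast args i
    have h2 : (PySem.List.slice args (some ((i:Int)+1)) none) = args.drop (i+1) := by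
      have := PySem.List.slice_from_natCast args (i+1)
      push_cast at this ⊢
      exact this
    simp [h1, h2]
    omega
  · omega

def discard_unused_arguments (lut : String) (args : List String) : String × List String :=
  let r := pvLoopA lut.toList args 0
  (String.mk r.1, r.2)

-- ===== PORT B =====
-- cells[0::2]  (every second element starting at index 0; hand port of the step-2 slice, exact)
def pvEvens {α : Type} : List α → List α
  | [] => []
  | [a] => [a]
  | a :: _ :: t => a :: pvEvens t

-- cells[1::2]
def pvOdds {α : Type} : List α → List α
  | [] => []
  | [_] => []
  | _ :: b :: t => b :: pvOdds t

-- the for loop of B, with `used` as the accumulator list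
def pvLoopB (cells : List (List Char)) (args : List String) (used : List String) :
    List (List Char) × List String :=
  match args with
  | [] => (cells, used)
  | a :: rest =>
    let e := pvEvens cells
    let o := pvOdds cells
    if e = o then pvLoopB e rest used
    else pvLoopB (List.zipWith (· ++ ·) e o) rest (used ++ [a])

def discard_unused_arguments_alt (lut : String) (args : List String) : String × List String :=
  let r := pvLoopB (lut.toList.map (fun c => [c])) args []
  (String.mk r.1.flatten, r.2)

-- ===== PRECONDITION & SPEC =====
-- Pre_: the assertion `len(lut) == 1 << len(args)` at the top of A (and of B); A raises AssertionError otherwise.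
def Pre_discard_unused_arguments (lut : String) (args : List String) : Prop :=
  lut.toList.length = 2 ^ args.length
instance (lut : String) (args : List String) : Decidable (Pre_discard_unused_arguments lut args) := by
  unfold Pre_discard_unused_arguments; infer_instance

def pvWitness_discard_unused_arguments : String × List String := ("01", ["x"])

def Spec_discard_unused_arguments (lut : String) (args : List String) (out : String × List String) : Prop := out = discard_unused_arguments_alt lut args
instance (lut : String) (args : List String) (out : String × List String) : Decidable (Spec_discard_unused_arguments lut args out) := by unfold Spec_discard_unused_arguments; infer_instance

-- ===== CLAIM (what is proved, stated in full; the proofs are below) =====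
def Claim_equal_discard_unused_arguments : Prop := ∀ (lut : String) (args : List String), Dom_discard_unused_arguments lut args → Pre_discard_unused_arguments lut args → Spec_discard_unused_arguments lut args (discard_unused_arguments lut args)

-- ===== LEMMAS AND PROOFS =====

-- disjoint bits add
theorem pv_disj_or_eq_add (a b : Nat) (h : a &&& b = 0) : a ||| b = a + b := by
  induction a using Nat.binaryRec generalizing b with
  | zero => simp
  | bit ba na ih =>
    induction b using Nat.binaryRec with
    | zero => simp
    | bit bb nb _ =>
      rw [Nat.land_bit] at h
      rw [Nat.lor_bit]
      have hb : (ba && bb) = false ∧ na &&& nb = 0 := by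
        rcases Nat.eq_zero_or_pos (na &&& nb) with h0 | hpos
        · refine ⟨?_, h0⟩
          by_contra hc
          have : Nat.bit (ba && bb) (na &&& nb) ≠ 0 := by
            simp [Nat.bit, h0]
            cases ba <;> cases bb <;> simp_all
          exact this h
        · exfalso
          have : Nat.bit (ba && bb) (na &&& nb) ≠ 0 := by
            simp [Nat.bit]
            cases (ba && bb) <;> simp <;> omega
          exact this h
      rcases hb with ⟨h1, h2⟩
      rw [ih nb h2]
      simp [Nat.bit]
      cases ba <;> cases bb <;> simp_all <;> ring

theorem pv_and_two_pow_eq_zero (k o i : Nat) (ho : o < 2^i) :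
    ((k * 2^i + o) &&& 2^i = 0 ↔ k % 2 = 0) := by
  have hp : 0 < 2^i := by positivity
  rw [Nat.and_two_pow, Nat.testBit_eq_decide_div_mod_eq]
  have hdiv : (k * 2^i + o) / 2^i = k := by
    rw [Nat.mul_comm k, Nat.mul_add_div hp, Nat.div_eq_of_lt ho, Nat.add_zero]
  rw [hdiv]
  rcases Nat.mod_two_eq_zero_or_one k with h | h <;> simp [h]

theorem pv_or_two_pow (k o i : Nat) (ho : o < 2^i) (hk : k % 2 = 0) :
    (k * 2^i + o) ||| 2^i = (k+1) * 2^i + o := by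
  have h0 : (k * 2^i + o) &&& 2^i = 0 := (pv_and_two_pow_eq_zero k o i ho).2 hk
  rw [pv_disj_or_eq_add _ _ h0]
  ring

theorem pv_foldl_or_if {α : Type} (P : α → Prop) [DecidablePred P] (l : List α) (d : Bool) :
    l.foldl (fun d j => if P j then true else d) d = (d || l.any (fun j => decide (P j))) := by
  induction l generalizing d with
  | nil => simp
  | cons x t ih =>
    simp only [List.foldl_cons, List.any_cons, ih]
    by_cases h : P x <;> simp [h]

theorem pv_one_shl (i : Nat) : ((1:Int) <<< i) = ((2^i : Nat) : Int) := by
  simp [Int.shiftLeft_eq]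

theorem pv_flatten_length_uniform {α : Type} (cells : List (List α)) (m : Nat)
    (hm : ∀ c ∈ cells, c.length = m) : cells.flatten.length = cells.length * m := by
  induction cells with
  | nil => simp
  | cons c t ih =>
    simp only [List.flatten_cons, List.length_append, List.length_cons]
    rw [hm c (by simp), ih (fun x hx => hm x (by simp [hx]))]
    ring

theorem pv_flatten_getD_uniform {α : Type} [Inhabited α] (cells : List (List α)) (m : Nat)
    (hm : ∀ c ∈ cells, c.length = m) (k o : Nat) (ho : o < m) (d : α) :
    cells.flatten.getD (k * m + o) d = (cells.getD k []).getD o d := by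
  induction cells generalizing k with
  | nil => simp
  | cons c t ih =>
    cases k with
    | zero =>
      have hc : c.length = m := hm c (by simp)
      simp only [List.flatten_cons, Nat.zero_mul, Nat.zero_add, List.getD_cons_zero]
      rw [List.getD_append _ _ _ _ (by omega)]
    | succ k =>
      have hc : c.length = m := hm c (by simp)
      have harith : (k+1) * m + o = c.length + (k * m + o) := by rw [hc]; ring
      simp only [List.flatten_cons, harith, List.getD_cons_succ]
      rw [List.getD_append_right _ _ _ _ (by omega)]
      have : c.length + (k * m + o) - c.length = k * m + o := by omega
      rw [this, ih (fun x hx => hm x (by simp [hx])) k]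

theorem pv_evens_getElem? {α : Type} (l : List α) (k : Nat) :
    (pvEvens l)[k]? = l[2*k]? := by
  induction l using pvEvens.induct generalizing k with
  | case1 => simp [pvEvens]
  | case2 a =>
    cases k with
    | zero => simp [pvEvens]
    | succ k => simp [pvEvens]
  | case3 a b t ih =>
    cases k with
    | zero => simp [pvEvens]
    | succ k =>
      simp only [pvEvens, List.getElem?_cons_succ]
      rw [ih]
      have h2 : 2*(k+1) = (2*k+1)+1 := by omega
      simp [h2]

theorem pv_odds_getElem? {α : Type} (l : List α) (k : Nat) :
    (pvOdds l)[k]? = l[2*k+1]? := by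
  induction l using pvOdds.induct generalizing k with
  | case1 => simp [pvOdds]
  | case2 a => simp [pvOdds]
  | case3 a b t ih =>
    cases k with
    | zero => show (b :: pvOdds t)[0]? = _; simp
    | succ k =>
      show (b :: pvOdds t)[k+1]? = _
      simp only [List.getElem?_cons_succ]
      rw [ih]
      have h2 : 2*(k+1) = (2*k+1)+1 := by omega
      rw [h2, List.getElem?_cons_succ]

theorem pv_evens_length {α : Type} (l : List α) : (pvEvens l).length = (l.length + 1) / 2 := by
  induction l using pvEvens.induct with
  | case1 => simp [pvEvens]
  | case2 a => simp [pvEvens]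
  | case3 a b t ih =>
    show (a :: pvEvens t).length = _
    simp [ih]
    omega

theorem pv_odds_length {α : Type} (l : List α) : (pvOdds l).length = l.length / 2 := by
  induction l using pvOdds.induct with
  | case1 => simp [pvOdds]
  | case2 a => simp [pvOdds]
  | case3 a b t ih =>
    show (b :: pvOdds t).length = _
    simp [ih]
    omega

theorem pv_mem_evens {α : Type} (l : List α) (x : α) (h : x ∈ pvEvens l) : x ∈ l := by
  induction l using pvEvens.induct with
  | case1 => simp [pvEvens] at h
  | case2 a => simp [pvEvens] at h; simp [h]
  | case3 a b t ih =>
    simp only [pvEvens, List.mem_cons] at h ⊢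
    rcases h with h | h
    · exact Or.inl h
    · exact Or.inr (Or.inr (ih h))

-- evens = odds iff every adjacent pair agrees
theorem pv_eo_eq_iff {α : Type} (l : List α) :
    pvEvens l = pvOdds l ↔ ∀ k, l[2*k]? = l[2*k+1]? := by
  constructor
  · intro h k
    rw [← pv_evens_getElem?, ← pv_odds_getElem?, h]
  · intro h
    apply List.ext_getElem?
    intro k
    rw [pv_evens_getElem?, pv_odds_getElem?, h]

theorem pv_flatten_zip_eo {α : Type} (l : List (List α)) (h : l.length % 2 = 0) :
    (List.zipWith (· ++ ·) (pvEvens l) (pvOdds l)).flatten = l.flatten := by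
  induction l using pvEvens.induct with
  | case1 => rfl
  | case2 a => simp at h
  | case3 a b t ih =>
    simp only [List.length_cons] at h
    simp only [pvEvens, pvOdds, List.zipWith_cons_cons, List.flatten_cons]
    rw [ih (by omega)]
    simp

theorem pv_zip_eo_length {α : Type} (l : List (List α)) :
    (List.zipWith (· ++ ·) (pvEvens l) (pvOdds l)).length = l.length / 2 := by
  rw [List.length_zipWith, pv_evens_length, pv_odds_length]
  omega

theorem pv_zip_eo_uniform {α : Type} (l : List (List α)) (m : Nat)
    (hm : ∀ c ∈ l, c.length = m) (x : List α)
    (hx : x ∈ List.zipWith (· ++ ·) (pvEvens l) (pvOdds l)) : x.length = 2 * m := by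
  induction l using pvEvens.induct with
  | case1 => simp [pvEvens, pvOdds] at hx
  | case2 a => simp [pvEvens, pvOdds] at hx
  | case3 a b t ih =>
    simp only [pvEvens, pvOdds, List.zipWith_cons_cons, List.mem_cons] at hx
    rcases hx with rfl | hx
    · simp [hm a (by simp), hm b (by simp)]; omega
    · exact ih (fun c hc => hm c (by simp [hc])) hx

-- the diff scan of A over the flattened cells decides exactly "evens ≠ odds"
theorem pv_diffA_false_iff (cells : List (List Char)) (i t : Nat)
    (hm : ∀ c ∈ cells, c.length = 2^i) (hlen : cells.length = 2*t) :
    (pvDiffA cells.flatten i = false ↔ pvEvens cells = pvOdds cells) := by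
  have hpi : 0 < 2^i := by positivity
  have hL : cells.flatten.length = 2*t*(2^i) := by
    rw [pv_flatten_length_uniform cells (2^i) hm, hlen]
  -- the fold is an existential scan; rephrase it as a ∀ over Nat indices
  have hfold : pvDiffA cells.flatten i = false ↔
      ∀ n : Nat, n < 2*t*(2^i) → n &&& 2^i = 0 →
        cells.flatten.getD n ' ' = cells.flatten.getD (n ||| 2^i) ' ' := by
    unfold pvDiffA
    rw [pv_foldl_or_if]
    simp only [Bool.false_or, List.any_eq_false, decide_eq_true_eq]
    constructor
    · intro h n hn hb
      have hmem : ((n:Int)) ∈ PySem.List.pyRange 0 (PySem.List.len cells.flatten) 1 := by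
        rw [PySem.List.mem_pyRange_one, PySem.List.len_eq, hL]
        exact ⟨Int.natCast_nonneg n, by exact_mod_cast hn⟩
      have h2 := h _ hmem
      by_contra hne
      apply h2
      refine ⟨?_, ?_⟩
      · rw [pv_one_shl, PySem.Int.band_natCast]
        exact_mod_cast hb
      · rw [pv_one_shl, PySem.Int.bor_natCast, PySem.List.pyGetD_natCast, PySem.List.pyGetD_natCast]
        exact hne
    · intro h j hj
      rw [PySem.List.mem_pyRange_one, PySem.List.len_eq, hL] at hj
      obtain ⟨hj0, hjL⟩ := hj
      obtain ⟨n, rfl⟩ := Int.eq_ofNat_of_zero_le hj0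
      rintro ⟨hb, hne⟩
      rw [pv_one_shl, PySem.Int.band_natCast] at hb
      rw [pv_one_shl, PySem.Int.bor_natCast, PySem.List.pyGetD_natCast, PySem.List.pyGetD_natCast] at hne
      exact hne (h n (by exact_mod_cast hjL) (by exact_mod_cast hb))
  rw [hfold, pv_eo_eq_iff]
  -- now relate flat reads to pairs of cells
  constructor
  · intro h k
    by_cases hk : 2*k+1 < cells.length
    · have hk0 : 2*k < cells.length := by omega
      have hu : cells[2*k]'hk0 ∈ cells := List.getElem_mem hk0
      have hv : cells[2*k+1]'hk ∈ cells := List.getElem_mem hk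
      rw [List.getElem?_eq_getElem hk0, List.getElem?_eq_getElem hk]
      congr 1
      apply List.ext_getElem (by rw [hm _ hu, hm _ hv])
      intro o ho1 ho2
      have ho : o < 2^i := by rw [hm _ hu] at ho1; exact ho1
      have hn : (2*k)*(2^i) + o < 2*t*(2^i) := by
        have : 2*k+1 < 2*t := by omega
        nlinarith
      have hb : ((2*k)*(2^i) + o) &&& 2^i = 0 :=
        (pv_and_two_pow_eq_zero (2*k) o i ho).2 (by omega)
      have heq := h _ hn hb
      rw [pv_or_two_pow (2*k) o i ho (by omega)] at heq
      rw [pv_flatten_getD_uniform cells (2^i) hm (2*k) o ho, pv_flatten_getD_uniform cells (2^i) hm (2*k+1) o ho] at heq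
      have hgu : cells.getD (2*k) [] = cells[2*k]'hk0 := List.getD_eq_getElem cells [] hk0
      have hgv : cells.getD (2*k+1) [] = cells[2*k+1]'hk := List.getD_eq_getElem cells [] hk
      rw [hgu, hgv] at heq
      rw [List.getD_eq_getElem _ ' ' (by rw [hm _ hu]; exact ho), List.getD_eq_getElem _ ' ' (by rw [hm _ hv]; exact ho)] at heq
      exact heq
    · rw [List.getElem?_eq_none (by omega), List.getElem?_eq_none (by omega)]
  · intro h n hn hb
    set k := n / 2^i with hkdef
    set o := n % 2^i with hodef
    have ho : o < 2^i := Nat.mod_lt _ hpi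
    have hno : n = k*(2^i) + o := by
      rw [hkdef, hodef, Nat.mul_comm]
      exact (Nat.div_add_mod n (2^i)).symm
    have hkeven : k % 2 = 0 := by
      rw [hno] at hb
      exact (pv_and_two_pow_eq_zero k o i ho).1 hb
    have hkt : k < 2*t := by
      rw [hkdef]
      exact Nat.div_lt_of_lt_mul (by rw [Nat.mul_comm (2*t)] at hn; exact hn)
    obtain ⟨k', hk'⟩ : ∃ k', k = 2*k' := ⟨k/2, by omega⟩
    have hpair := h k'
    rw [← hk'] at hpair
    have hk1 : k + 1 < cells.length := by rw [hlen]; omega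
    have hk0 : k < cells.length := by omega
    have hgd : cells.getD k [] = cells.getD (k+1) [] := by
      rw [List.getD_eq_getElem cells [] hk0, List.getD_eq_getElem cells [] hk1]
      have h1 := hpair
      rw [List.getElem?_eq_getElem hk0, List.getElem?_eq_getElem hk1] at h1
      exact Option.some.inj h1
    rw [hno, pv_or_two_pow k o i ho hkeven,
      pv_flatten_getD_uniform cells (2^i) hm k o ho,
      pv_flatten_getD_uniform cells (2^i) hm (k+1) o ho, hgd]


-- A's discard of an unused argument keeps exactly the even cells
-- a filter over an enumerate segment on which the predicate is constant
theorem pv_filter_enum_const {α : Type} (p : Int → Bool) (b : Bool) (xs : List α) (s : Int)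
    (h : ∀ t : Nat, t < xs.length → p (s + t) = b) :
    ((PySem.List.enumerate xs s).filter (fun jb => p jb.1)).map Prod.snd
      = if b then xs else [] := by
  induction xs generalizing s with
  | nil => simp [PySem.List.enumerate_nil]
  | cons x t ih =>
    rw [PySem.List.enumerate_cons]
    have h0 : p s = b := by simpa using h 0 (by simp)
    have hrec := ih (s+1) (by
      intro u hu
      have := h (u+1) (by simp; omega)
      push_cast at this ⊢
      rw [show s + 1 + (u:Int) = s + ((u:Int) + 1) by ring]
      exact this)
    cases b
    · simp only [List.filter_cons, h0]
      simpa using hrec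
    · simp only [List.filter_cons, h0]
      simp only [if_true] at hrec
      simp [hrec]

theorem pv_discard_aux (i : Nat) (cells : List (List Char)) (c : Nat)
    (he : cells.length % 2 = 0) (hm : ∀ cl ∈ cells, cl.length = 2^i) :
    ((PySem.List.enumerate cells.flatten ((2^(i+1) * c : Nat) : Int)).filter
        (fun jb => (decide (PySem.Int.band jb.1 ((1:Int) <<< i) ≠ 0)) == false)).map Prod.snd
      = (pvEvens cells).flatten := by
  induction cells using pvEvens.induct generalizing c with
  | case1 => simp [PySem.List.enumerate_nil, pvEvens]
  | case2 a => simp at he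
  | case3 a b tl ih =>
    have ha : a.length = 2^i := hm a (by simp)
    have hb : b.length = 2^i := hm b (by simp)
    have hflat : (a :: b :: tl).flatten = a ++ (b ++ tl.flatten) := by simp
    rw [hflat, PySem.List.enumerate_append, PySem.List.enumerate_append,
        List.filter_append, List.filter_append, List.map_append, List.map_append]
    have hseg1 : ((PySem.List.enumerate a ((2^(i+1) * c : Nat) : Int)).filter
        (fun jb => (decide (PySem.Int.band jb.1 ((1:Int) <<< i) ≠ 0)) == false)).map Prod.snd = a := by
      rw [pv_filter_enum_const (fun j => decide (PySem.Int.band j ((1:Int) <<< i) ≠ 0) == false) true]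
      · simp
      · intro u hu
        have hu' : u < 2^i := by rw [ha] at hu; exact hu
        have hcast : ((2^(i+1) * c : Nat) : Int) + (u:Int) = ((2*c) * 2^i + u : Nat) := by
          push_cast; ring
        rw [hcast, pv_one_shl, PySem.Int.band_natCast]
        have hz : ((2*c) * 2^i + u) &&& 2^i = 0 :=
          (pv_and_two_pow_eq_zero (2*c) u i hu').2 (by omega)
        simp [hz]
    have hseg2 : ((PySem.List.enumerate b (((2^(i+1) * c : Nat) : Int) + (a.length:Int))).filter
        (fun jb => (decide (PySem.Int.band jb.1 ((1:Int) <<< i) ≠ 0)) == false)).map Prod.snd = [] := by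
      rw [pv_filter_enum_const (fun j => decide (PySem.Int.band j ((1:Int) <<< i) ≠ 0) == false) false]
      · simp
      · intro u hu
        have hu' : u < 2^i := by rw [hb] at hu; exact hu
        have hcast : ((2^(i+1) * c : Nat) : Int) + (a.length:Int) + (u:Int)
            = ((2*c+1) * 2^i + u : Nat) := by
          rw [ha]; push_cast; ring
        rw [hcast, pv_one_shl, PySem.Int.band_natCast]
        have hz : ¬ ((2*c+1) * 2^i + u) &&& 2^i = 0 := by
          intro hx
          have := (pv_and_two_pow_eq_zero (2*c+1) u i hu').1 hx
          omega
        simp [hz]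
    have hcast3 : (((2^(i+1) * c : Nat) : Int) + (a.length:Int)) + (b.length:Int)
        = ((2^(i+1) * (c+1) : Nat) : Int) := by
      rw [ha, hb]; push_cast; ring
    have htl := ih (c+1) (by simp at he; omega) (fun cl hcl => hm cl (by simp [hcl]))
    rw [hseg1, hseg2, hcast3, htl]
    show a ++ ([] ++ (pvEvens tl).flatten) = (a :: pvEvens tl).flatten
    simp

theorem pv_discardA_eq (cells : List (List Char)) (i : Nat)
    (hm : ∀ c ∈ cells, c.length = 2^i) (he : cells.length % 2 = 0) :
    pvDiscardA cells.flatten i false = (pvEvens cells).flatten := by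
  unfold pvDiscardA
  have h0 : (0:Int) = ((2^(i+1) * 0 : Nat) : Int) := by simp
  rw [show PySem.List.enumerate cells.flatten = PySem.List.enumerate cells.flatten ((2^(i+1) * 0 : Nat) : Int) by rw [← h0]]
  exact pv_discard_aux i cells 0 he hm

-- main loop correspondence
theorem pv_main (rest : List String) (cells : List (List Char)) (acc : List String)
    (hm : ∀ c ∈ cells, c.length = 2 ^ acc.length)
    (hc : cells.length = 2 ^ rest.length) :
    pvLoopA cells.flatten (acc ++ rest) acc.length =
      ((pvLoopB cells rest acc).1.flatten, (pvLoopB cells rest acc).2) := by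
  induction rest generalizing cells acc with
  | nil =>
    rw [pvLoopA]
    simp [pvLoopB]
  | cons a rest' ih =>
    have hi : acc.length < (acc ++ a :: rest').length := by simp
    have heven : cells.length = 2 * 2^rest'.length := by
      rw [hc]
      simp [List.length_cons, pow_succ]
      ring
    have hdiff := pv_diffA_false_iff cells acc.length (2^rest'.length) hm heven
    rw [pvLoopA, dif_pos hi]
    by_cases heo : pvEvens cells = pvOdds cells
    · have hdf : pvDiffA cells.flatten acc.length = false := hdiff.2 heo
      rw [if_pos hdf, pv_discardA_eq cells acc.length hm (by omega)]
      have hargs1 : PySem.List.slice (acc ++ a :: rest') none (some ((acc.length:Nat):Int)) = acc := by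
        rw [PySem.List.slice_to_natCast]
        simp
      have hargs2 : PySem.List.slice (acc ++ a :: rest') (some ((((acc.length:Nat):Int))+1)) none = rest' := by
        have hc2 : (((acc.length:Nat):Int)) + 1 = (((acc.length + 1 : Nat)):Int) := by push_cast; ring
        rw [hc2, PySem.List.slice_from_natCast]
        rw [← List.drop_drop]
        simp
      rw [hargs1, hargs2]
      have hres := ih (pvEvens cells) acc
        (fun cl hcl => hm cl (pv_mem_evens cells cl hcl))
        (by rw [pv_evens_length, heven]; omega)
      rw [hres]
      have hB : pvLoopB cells (a :: rest') acc = pvLoopB (pvEvens cells) rest' acc := by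
        rw [pvLoopB]
        simp [heo]
      rw [hB]
    · have hdt : ¬ pvDiffA cells.flatten acc.length = false := by
        intro hx
        exact heo (hdiff.1 hx)
      rw [if_neg hdt]
      have hassoc : acc ++ a :: rest' = (acc ++ [a]) ++ rest' := by simp
      have hlen1 : acc.length + 1 = (acc ++ [a]).length := by simp
      rw [hassoc, hlen1]
      have hres := ih (List.zipWith (· ++ ·) (pvEvens cells) (pvOdds cells)) (acc ++ [a])
        (fun cl hcl => by
          have := pv_zip_eo_uniform cells (2^acc.length) hm cl hcl
          rw [this]
          simp [pow_succ]
          ring)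
        (by rw [pv_zip_eo_length, heven]; simp)
      rw [← pv_flatten_zip_eo cells (by omega), hres]
      have hB : pvLoopB cells (a :: rest') acc
          = pvLoopB (List.zipWith (· ++ ·) (pvEvens cells) (pvOdds cells)) rest' (acc ++ [a]) := by
        rw [pvLoopB]
        simp [heo]
      rw [hB]

theorem pv_flatten_map_singleton {α : Type} (l : List α) :
    (l.map (fun c => [c])).flatten = l := by
  induction l with
  | nil => rfl
  | cons x t ih => simp [ih]

-- ===== VERDICT (by name: the statement is the Claim_ definition above) =====
theorem discard_unused_arguments_spec : Claim_equal_discard_unused_arguments := by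
  intro lut args _ hpre
  unfold Spec_discard_unused_arguments
  unfold Pre_discard_unused_arguments at hpre
  unfold discard_unused_arguments discard_unused_arguments_alt
  have h := pv_main args (lut.toList.map (fun c => [c])) []
    (by intro c hc; simp at hc; obtain ⟨x, _, rfl⟩ := hc; simp)
    (by simpa using hpre)
  simp only [List.nil_append, List.length_nil] at h
  rw [pv_flatten_map_singleton] at h
  simp [h]
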